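-- pv_equiv track=rewrite | github.com/And-Li/Longest-English-most-frequent-Russian-word | 15.4.1.py | long_enough
-- ===== SOURCE A (Python) =====
-- def long_enough(text):
--     list_of_words_long_enough = []  # пустой список, куда будем скаладывать слова, длиннее 3-х букв
--     frequency_of_copies = {}  # пустой словарь для складывания пар "слово": количество упоминаний
--     for item in text.split():
--         if len(item) >= 3:
--             list_of_words_long_enough.append(item)  # перебираем слова, складываем те, которые длинее 3-х букв в список
--     for item in list_of_words_long_enough:
--         counter_of_copies = frequency_of_copies.get(item, 0)  # слово пишется в словарь с ключём
--         frequency_of_copies[item] = counter_of_copies + 1  # при повторении слова - ключ+1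
--     max_value = max(frequency_of_copies.values())  # выбирает максимальное значение из словаря
--     final_dict = {k: v for k, v in frequency_of_copies.items() if v == max_value}  # выбирает пару ключ:значение с макс. значением
--     return final_dict
-- ===== SOURCE B (Python) =====
-- def long_enough(text):
--     frequency = {}
--     for word in text.split():
--         if len(word) >= 3:
--             frequency[word] = frequency.get(word, 0) + 1
--     by_count = {}
--     for word, count in frequency.items():
--         by_count.setdefault(count, []).append(word)
--     m = max(by_count)
--     return {word: m for word in by_count[m]}
-- ===== Notes on version B (the rewrite author's own statement) =====
-- stated objective: alternative
-- what changed: Fuses A's two passes (collect long words, then count) into one counting pass, and replaces A's max-over-values-then-filter-all-items final phase by an inverted index bucketing words by count, taking the top bucket.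
import Mathlib
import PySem

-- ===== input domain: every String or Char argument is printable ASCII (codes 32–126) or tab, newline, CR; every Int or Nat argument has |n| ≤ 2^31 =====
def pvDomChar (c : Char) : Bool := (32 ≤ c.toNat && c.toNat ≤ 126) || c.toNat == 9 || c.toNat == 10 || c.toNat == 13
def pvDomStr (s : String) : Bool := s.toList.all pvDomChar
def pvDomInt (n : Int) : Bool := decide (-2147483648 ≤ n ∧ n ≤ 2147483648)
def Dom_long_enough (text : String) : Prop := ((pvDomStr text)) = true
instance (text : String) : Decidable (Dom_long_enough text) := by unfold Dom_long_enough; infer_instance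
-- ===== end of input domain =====

-- B fuses A's two passes (collect, then count) into one counting pass and replaces the
-- max-over-values-then-filter final phase by an inverted index bucketing words by count.

-- ===== PORT A =====
def long_enough (text : String) : List (String × Int) :=
  let list_of_words_long_enough : List String :=
    (PySem.Str.split₀ text).foldl
      (fun acc item => if 3 ≤ PySem.Str.len item then acc ++ [item] else acc) []
  let frequency_of_copies : PySem.Dict String Int :=
    list_of_words_long_enough.foldl
      (fun d item => d.insert item (d.getD item 0 + 1)) PySem.Dict.empty
  match PySem.List.max? frequency_of_copies.values (fun v => v) with
  | none => []   -- Python raises ValueError here; excluded by Pre_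
  | some max_value =>
      (frequency_of_copies.items.foldl
        (fun d p => if p.2 == max_value then d.insert p.1 p.2 else d) PySem.Dict.empty).items

-- ===== PORT B =====
def long_enough_alt (text : String) : List (String × Int) :=
  let frequency : PySem.Dict String Int :=
    (PySem.Str.split₀ text).foldl
      (fun d word => if 3 ≤ PySem.Str.len word then d.insert word (d.getD word 0 + 1) else d)
      PySem.Dict.empty
  let by_count : PySem.Dict Int (List String) :=
    frequency.items.foldl
      (fun d p => d.modify p.2 [] (· ++ [p.1])) PySem.Dict.empty
  match PySem.List.max? by_count.keys (fun k => k) with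
  | none => []   -- Python raises ValueError here; excluded by Pre_
  | some m => (by_count.getD m []).map (fun word => (word, m))

-- ===== PRECONDITION & SPEC =====
-- Pre_ excludes exactly the texts with no word of length ≥ 3, on which A (and B) raise ValueError (max of an empty sequence).
def Pre_long_enough (text : String) : Prop :=
  ∃ w ∈ PySem.Str.split₀ text, 3 ≤ PySem.Str.len w
instance (text : String) : Decidable (Pre_long_enough text) := by unfold Pre_long_enough; infer_instance
def pvWitness_long_enough : String := "foo bar foo"
def Spec_long_enough (text : String) (out : List (String × Int)) : Prop := out = long_enough_alt text
instance (text : String) (out : List (String × Int)) : Decidable (Spec_long_enough text out) := by unfold Spec_long_enough; infer_instance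

-- ===== CLAIM (what is proved, stated in full; the proofs are below) =====
def Claim_equal_long_enough : Prop := ∀ (text : String), Dom_long_enough text → Pre_long_enough text → Spec_long_enough text (long_enough text)

-- ===== LEMMAS AND PROOFS =====

-- max over two Int lists with the same members agree (identity key)
theorem pv_max_eq_of_mem_iff (xs ys : List Int) (h : ∀ a, a ∈ xs ↔ a ∈ ys) :
    PySem.List.max? xs (fun v => v) = PySem.List.max? ys (fun v => v) := by
  cases hx : PySem.List.max? xs (fun v => v) with
  | none =>
    rw [PySem.List.max?_eq_none_iff] at hx
    rw [eq_comm, PySem.List.max?_eq_none_iff]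
    cases hy2 : ys with
    | nil => rfl
    | cons b t => exact absurd ((h b).mpr (by simp [hy2])) (by simp [hx])
  | some mx =>
    cases hy : PySem.List.max? ys (fun v => v) with
    | none =>
      rw [PySem.List.max?_eq_none_iff] at hy
      exact absurd ((h mx).mp (PySem.List.max?_mem hx)) (by simp [hy])
    | some my =>
      have h1 := PySem.List.max?_isMax hy mx ((h mx).mp (PySem.List.max?_mem hx))
      have h2 := PySem.List.max?_isMax hx my ((h my).mpr (PySem.List.max?_mem hy))
      simp only [Option.some.injEq]
      omega

-- getD on B's bucketing fold: the bucket of m holds the first components of the items with value m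
theorem pv_bucket_getD (its : List (String × Int)) (m : Int) :
    (its.foldl (fun d p => d.modify p.2 [] (· ++ [p.1])) PySem.Dict.empty).getD m []
      = (its.filter (fun p => p.2 == m)).map (·.1) := by
  have h : its.foldl (fun d p => d.modify p.2 [] (· ++ [p.1])) PySem.Dict.empty
      = (its.map Prod.swap).foldl (fun d p => d.modify p.1 [] (· ++ [p.2])) PySem.Dict.empty := by
    rw [List.foldl_map]; rfl
  rw [h, PySem.Dict.getD_foldl_modify_append]
  simp [List.filter_map, List.map_map, Function.comp_def, Prod.swap]

-- keys of B's bucketing fold are the distinct values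
theorem pv_bucket_keys (its : List (String × Int)) :
    (its.foldl (fun d p => d.modify p.2 [] (· ++ [p.1])) PySem.Dict.empty).keys
      = PySem.Set.ofList (its.map (·.2)) := by
  rw [PySem.Dict.keys_foldl_modify_key (key := Prod.snd) (f := fun _ p => (· ++ [p.1]))]
  simp [PySem.Dict.empty, PySem.Set.update_nil_left]

-- A's final dict comprehension over items with distinct keys is a plain filter
theorem pv_final_filter (its : List (String × Int)) (m : Int) (hnd : (its.map (·.1)).Nodup) :
    (its.foldl (fun d p => if p.2 == m then d.insert p.1 p.2 else d) PySem.Dict.empty).items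
      = its.filter (fun p => p.2 == m) := by
  rw [PySem.List.foldl_if_eq_foldl_filter]
  have hfresh : ∀ a ∈ its.filter (fun p => p.2 == m),
      (PySem.Dict.empty : PySem.Dict String Int).contains a.1 = false := by
    intro a _; simp [PySem.Dict.contains_empty]
  have hnd2 : ((its.filter (fun p => p.2 == m)).map (·.1)).Nodup :=
    (List.Sublist.map _ List.filter_sublist).nodup hnd
  have := PySem.Dict.items_foldl_insert_fresh (l := its.filter (fun p => p.2 == m))
      (k := Prod.fst) (v := Prod.snd) (d := PySem.Dict.empty) hfresh hnd2
  simpa using this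

theorem long_enough_spec : Claim_equal_long_enough := by
  intro text _ _
  show long_enough text = long_enough_alt text
  simp only [long_enough, long_enough_alt]
  -- both counting phases produce the counter of the filtered words
  have hA1 : (PySem.Str.split₀ text).foldl
      (fun acc item => if 3 ≤ PySem.Str.len item then acc ++ [item] else acc) [] =
      (PySem.Str.split₀ text).filter (fun w => decide (3 ≤ PySem.Str.len w)) := by
    rw [PySem.List.foldl_append_ite_eq_filter]; simp
  have hB1 : (PySem.Str.split₀ text).foldl
      (fun d w => if 3 ≤ PySem.Str.len w then d.insert w (d.getD w 0 + 1) else d)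
      PySem.Dict.empty
      = PySem.Dict.counter ((PySem.Str.split₀ text).filter (fun w => decide (3 ≤ PySem.Str.len w))) := by
    rw [PySem.List.foldl_ite_eq_foldl_filter, PySem.Dict.foldl_insert_getD_add_one_eq_counter]
  rw [hA1, PySem.Dict.foldl_insert_getD_add_one_eq_counter, hB1]
  set C := PySem.Dict.counter ((PySem.Str.split₀ text).filter (fun w => decide (3 ≤ PySem.Str.len w))) with hC
  -- the two maxima agree
  have hkeys := pv_bucket_keys C.items
  have hvals : C.values = C.items.map (·.2) := by simp [PySem.Dict.values]
  have hmax : PySem.List.max? C.values (fun v => v)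
      = PySem.List.max? (C.items.foldl (fun d p => d.modify p.2 [] (· ++ [p.1])) PySem.Dict.empty).keys (fun k => k) := by
    apply pv_max_eq_of_mem_iff
    intro a
    rw [hkeys, hvals]
    simp [PySem.Set.mem_ofList]
  rw [hmax]
  cases hm : PySem.List.max? (C.items.foldl (fun d p => d.modify p.2 [] (· ++ [p.1])) PySem.Dict.empty).keys (fun k => k) with
  | none => rfl
  | some m =>
    dsimp only
    have hnd : (C.items.map (·.1)).Nodup := by
      have := PySem.Dict.nodup_keys_counter
        (xs := (PySem.Str.split₀ text).filter (fun w => decide (3 ≤ PySem.Str.len w)))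
      simpa [PySem.Dict.keys, hC] using this
    rw [pv_final_filter C.items m hnd, pv_bucket_getD C.items m, List.map_map]
    symm
    rw [List.map_congr_left (g := id) ?_, List.map_id]
    intro p hp
    have h2 : p.2 = m := by
      have := (List.mem_filter.mp hp).2
      simpa using this
    simp only [Function.comp_apply, id_eq]
    rw [← h2]
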